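-- pv_equiv track=rewrite | github.com/OpenSourceJesus/tinifyjs | StringExtensions.py | IndicesOfEnclosingChars
-- ===== SOURCE A (Python) =====
-- def IndicesOfEnclosingChars (string : str, encloser : str, charIndex : int):
-- 	if charIndex < len(encloser) or charIndex >= len(string) - len(encloser):
-- 		return None
-- 	isEnclosed = False
-- 	prevIndexOfEncloser = -1
-- 	indexOfEncloser = -1
-- 	while True:
-- 		indexOfEncloser = string.find(encloser, indexOfEncloser + 1)
-- 		if indexOfEncloser > charIndex:
-- 			if isEnclosed:
-- 				return (prevIndexOfEncloser, indexOfEncloser)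
-- 			else:
-- 				return None
-- 		elif indexOfEncloser != -1:
-- 			isEnclosed = not isEnclosed
-- 		elif isEnclosed:
-- 			return (prevIndexOfEncloser, indexOfEncloser)
-- 		else:
-- 			return None
-- 		prevIndexOfEncloser = indexOfEncloser
-- ===== SOURCE B (Python) =====
-- def IndicesOfEnclosingChars (string : str, encloser : str, charIndex : int):
-- 	if charIndex < len(encloser) or charIndex >= len(string) - len(encloser):
-- 		return None
-- 	occ = [i for i in range(len(string) + 1) if string.startswith(encloser, i)]
-- 	k = len([p for p in occ if p <= charIndex])
-- 	if k % 2 == 1: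
-- 		nxt = occ[k] if k < len(occ) else -1
-- 		return (occ[k - 1], nxt)
-- 	return None
-- ===== Notes on version B (the rewrite author's own statement) =====
-- stated objective: alternative
-- what changed: A's find-driven state machine (toggle an isEnclosed flag while repeatedly calling string.find) is replaced by a staged algorithm: B first materialises every occurrence position by testing startswith at each index of the whole string, then answers purely arithmetically from the parity of the count of positions <= charIndex and direct list indexing for the surrounding pair.
import Mathlib
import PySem

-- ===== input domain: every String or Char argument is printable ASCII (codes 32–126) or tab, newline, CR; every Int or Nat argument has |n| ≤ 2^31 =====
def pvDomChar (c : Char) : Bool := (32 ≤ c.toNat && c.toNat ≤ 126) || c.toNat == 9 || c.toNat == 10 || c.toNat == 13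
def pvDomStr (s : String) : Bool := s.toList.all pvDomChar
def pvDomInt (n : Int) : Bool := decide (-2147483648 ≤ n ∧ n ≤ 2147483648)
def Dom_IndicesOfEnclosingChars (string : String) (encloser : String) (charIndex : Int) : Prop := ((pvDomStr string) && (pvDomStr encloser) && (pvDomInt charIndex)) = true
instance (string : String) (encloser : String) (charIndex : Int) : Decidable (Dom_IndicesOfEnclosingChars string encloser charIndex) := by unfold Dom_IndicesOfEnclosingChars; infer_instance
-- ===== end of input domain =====

-- B replaces A's find-driven toggling state machine by a staged algorithm: build the full list of
-- occurrence positions (startswith test at every index), then answer from count parity and indexing.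

-- helper lemmas the ports' termination proofs cite (so they stay above the ports)
theorem pvFindFrom_gt_len {s sub : List Char} {k : Nat} (h : s.length < k) :
    PySem.Chars.findFrom s sub (k : Int) = -1 := by
  simp only [PySem.Chars.findFrom]
  split_ifs <;> omega

theorem pvFindFrom_bounds {s sub : List Char} (start : Nat)
    (h : PySem.Chars.findFrom s sub (start : Int) ≠ -1) :
    start ≤ s.length ∧ (start : Int) ≤ PySem.Chars.findFrom s sub (start : Int) := by
  by_cases hk : start ≤ s.length
  · exact ⟨hk, (PySem.Chars.findFrom_natCast_spec s sub start hk h).1⟩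
  · exact absurd (pvFindFrom_gt_len (by omega)) h

-- ===== PORT A =====
-- A's while-loop: state (isEnclosed, prevIndexOfEncloser), next find start = indexOfEncloser + 1
def pvLoopA (s enc : List Char) (c : Int) (isEnclosed : Bool) (prev : Int) (start : Nat) :
    Option (Int × Int) :=
  let idx := PySem.Chars.findFrom s enc (start : Int)
  if c < idx then
    if isEnclosed then some (prev, idx) else none
  else if h : idx ≠ -1 then
    pvLoopA s enc c (!isEnclosed) idx (idx.toNat + 1)
  else if isEnclosed then some (prev, idx) else none
termination_by s.length + 1 - start
decreasing_by
  obtain ⟨h1, h2⟩ := pvFindFrom_bounds start h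
  omega

def IndicesOfEnclosingChars (string : String) (encloser : String) (charIndex : Int) :
    Option (Int × Int) :=
  if charIndex < PySem.Str.len encloser ∨ PySem.Str.len string - PySem.Str.len encloser ≤ charIndex then
    none
  else
    pvLoopA string.toList encloser.toList charIndex false (-1) 0

-- ===== PORT B =====
def IndicesOfEnclosingChars_alt (string : String) (encloser : String) (charIndex : Int) :
    Option (Int × Int) :=
  if charIndex < PySem.Str.len encloser ∨ PySem.Str.len string - PySem.Str.len encloser ≤ charIndex then
    none
  else
    -- occ = [i for i in range(len(string) + 1) if string.startswith(encloser, i)];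
    -- string.startswith(encloser, i) with 0 ≤ i ≤ len(string) is exactly the prefix test on the drop at i
    let occ := (PySem.List.pyRange 0 (PySem.Str.len string + 1) 1).filter
                 (fun i => PySem.Chars.startswith (string.toList.drop i.toNat) encloser.toList)
    let k := (occ.filter (fun p => p ≤ charIndex)).length
    if k % 2 = 1 then
      let nxt := if k < occ.length then occ.getD k (-1) else -1
      some (occ.getD (k - 1) (-1), nxt)
    else none

-- ===== PRECONDITION & SPEC =====
def Spec_IndicesOfEnclosingChars (string : String) (encloser : String) (charIndex : Int) (out : Option (Int × Int)) : Prop := out = IndicesOfEnclosingChars_alt string encloser charIndex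
instance (string : String) (encloser : String) (charIndex : Int) (out : Option (Int × Int)) : Decidable (Spec_IndicesOfEnclosingChars string encloser charIndex out) := by unfold Spec_IndicesOfEnclosingChars; infer_instance

-- ===== CLAIM (what is proved, stated in full; the proofs are below) =====
def Claim_equal_IndicesOfEnclosingChars : Prop := ∀ (string : String) (encloser : String) (charIndex : Int), Dom_IndicesOfEnclosingChars string encloser charIndex → Spec_IndicesOfEnclosingChars string encloser charIndex (IndicesOfEnclosingChars string encloser charIndex)

-- ===== LEMMAS AND PROOFS =====

-- all occurrence positions of enc in s (as Ints 0..|s|), and its suffix from a given start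
def pvOccAll (s enc : List Char) : List Int :=
  (PySem.List.pyRange 0 ((s.length : Int) + 1) 1).filter
    (fun i => PySem.Chars.startswith (s.drop i.toNat) enc)

def pvOccFrom (s enc : List Char) (start : Nat) : List Int :=
  (pvOccAll s enc).filter (fun i => (start : Int) ≤ i)

-- the abstract loop A runs, read off the occurrence list
def pvListLoop (c : Int) : List Int → Bool → Int → Option (Int × Int)
  | [], b, prev => if b then some (prev, -1) else none
  | h :: t, b, prev =>
      if c < h then (if b then some (prev, h) else none)
      else pvListLoop c t (!b) h

theorem pvMem_occAll {s enc : List Char} {i : Int} :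
    i ∈ pvOccAll s enc ↔ (0 ≤ i ∧ i ≤ (s.length : Int) ∧ PySem.Chars.startswith (s.drop i.toNat) enc = true) := by
  simp [pvOccAll, List.mem_filter, PySem.List.mem_pyRange_one]
  constructor
  · rintro ⟨⟨h1, h2⟩, h3⟩; exact ⟨h1, by omega, h3⟩
  · rintro ⟨h1, h2, h3⟩; exact ⟨⟨h1, by omega⟩, h3⟩

theorem pvOccAll_sorted (s enc : List Char) : (pvOccAll s enc).Pairwise (· < ·) :=
  List.Pairwise.filter _ (PySem.List.pairwise_lt_pyRange_one 0 _)

theorem pvOccFrom_sorted (s enc : List Char) (start : Nat) : (pvOccFrom s enc start).Pairwise (· < ·) :=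
  List.Pairwise.filter _ (pvOccAll_sorted s enc)

theorem pvInfix_iff (s enc : List Char) (start : Nat) (hstart : start ≤ s.length) :
    enc <:+: s.drop start ↔ ∃ j : Nat, start ≤ j ∧ j ≤ s.length ∧ enc <+: s.drop j := by
  constructor
  · intro h
    obtain ⟨t, hpre, hsuf⟩ := List.infix_iff_prefix_suffix.mp h
    obtain ⟨r, hr⟩ := hsuf
    refine ⟨start + r.length, by omega, ?_, ?_⟩
    · have := congrArg List.length hr
      simp [List.length_drop] at this
      omega
    · have ht : t = s.drop (start + r.length) := by
        have h1 : t = (s.drop start).drop r.length := by rw [← hr]; simp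
        rw [h1, List.drop_drop]
      rw [← ht]; exact hpre
  · rintro ⟨j, hsj, hjl, hpre⟩
    have hdd : s.drop j = (s.drop start).drop (j - start) := by
      rw [List.drop_drop]; congr 1; omega
    rw [hdd] at hpre
    exact hpre.isInfix.trans (List.drop_suffix _ _).isInfix

theorem pvOccFrom_empty (s enc : List Char) (start : Nat) (h : s.length < start) :
    pvOccFrom s enc start = [] := by
  unfold pvOccFrom
  rw [List.filter_eq_nil_iff]
  intro i hi
  have := pvMem_occAll.mp hi
  simp
  omega

theorem pvFind_eq_headD (s enc : List Char) (start : Nat) :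
    PySem.Chars.findFrom s enc (start : Int) = (pvOccFrom s enc start).headD (-1) := by
  by_cases hbig : s.length < start
  · rw [pvOccFrom_empty s enc start hbig, pvFindFrom_gt_len hbig]; rfl
  · have hstart : start ≤ s.length := by omega
    rcases hocc : pvOccFrom s enc start with _ | ⟨h, t⟩
    · -- no occurrence at or after start: findFrom = -1
      rw [(PySem.Chars.findFrom_natCast_eq_neg_one_iff s enc start hstart).mpr]
      · rfl
      · rw [pvInfix_iff s enc start hstart]
        rintro ⟨j, hsj, hjl, hpre⟩
        have hj : ((j : Int)) ∈ pvOccFrom s enc start := by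
          rw [pvOccFrom, List.mem_filter]
          refine ⟨pvMem_occAll.mpr ⟨by omega, by omega, ?_⟩, by simp; omega⟩
          rw [Int.toNat_natCast]
          exact (PySem.Chars.startswith_iff _ _).mpr hpre
        rw [hocc] at hj; simp at hj
    · -- h is the least occurrence ≥ start
      have hhmem : h ∈ pvOccFrom s enc start := by rw [hocc]; simp
      have hh := List.mem_filter.mp hhmem
      have hhall := pvMem_occAll.mp hh.1
      have hhstart : (start : Int) ≤ h := by simpa using hh.2
      have hne : PySem.Chars.findFrom s enc (start : Int) ≠ -1 := by
        rw [Ne, PySem.Chars.findFrom_natCast_eq_neg_one_iff s enc start hstart, not_not, pvInfix_iff s enc start hstart]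
        exact ⟨h.toNat, by omega, by omega, (PySem.Chars.startswith_iff _ _).mp hhall.2.2⟩
      obtain ⟨hge, hpre, hmin⟩ := PySem.Chars.findFrom_natCast_spec s enc start hstart hne
      set r := PySem.Chars.findFrom s enc (start : Int) with hr
      have hrle : r.toNat ≤ h.toNat := by
        by_contra hlt
        exact hmin h.toNat (by omega) (by omega)
          ((PySem.Chars.startswith_iff _ _).mp hhall.2.2)
      have hrmem : ((r.toNat : Int)) ∈ pvOccFrom s enc start := by
        rw [pvOccFrom, List.mem_filter]
        refine ⟨pvMem_occAll.mpr ⟨by omega, by omega, ?_⟩, by simp; omega⟩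
        rw [Int.toNat_natCast]
        exact (PySem.Chars.startswith_iff _ _).mpr hpre
      rw [hocc] at hrmem
      have hle : h ≤ (r.toNat : Int) := by
        rcases List.mem_cons.mp hrmem with heq | hmem
        · omega
        · have := (List.pairwise_cons.mp (by rw [← hocc]; exact pvOccFrom_sorted s enc start)).1 _ hmem
          omega
      have : r = h := by omega
      rw [this]; rfl

theorem pvOccFrom_tail (s enc : List Char) (start : Nat) (h : Int) (t : List Int)
    (hocc : pvOccFrom s enc start = h :: t) :
    pvOccFrom s enc (h.toNat + 1) = t := by
  have hhmem : h ∈ pvOccFrom s enc start := by rw [hocc]; simp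
  have hh := List.mem_filter.mp hhmem
  have hh0 : 0 ≤ h := (pvMem_occAll.mp hh.1).1
  have hhstart : (start : Int) ≤ h := by simpa using hh.2
  have hsorted : (h :: t).Pairwise (· < ·) := by rw [← hocc]; exact pvOccFrom_sorted s enc start
  have step1 : pvOccFrom s enc (h.toNat + 1)
      = (pvOccFrom s enc start).filter (fun i => ((h.toNat + 1 : Nat) : Int) ≤ i) := by
    unfold pvOccFrom
    rw [List.filter_filter]
    apply List.filter_congr
    intro i _
    by_cases hi : ((h.toNat + 1 : Nat) : Int) ≤ i
    · simp; omega
    · simp; omega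
  rw [step1, hocc]
  rw [List.filter_cons]
  have hnoth : ¬ ((h.toNat + 1 : Nat) : Int) ≤ h := by omega
  simp only [hnoth, decide_false]
  apply List.filter_eq_self.mpr
  intro x hx
  have := (List.pairwise_cons.mp hsorted).1 x hx
  simp; omega

theorem pvLoopA_eq_listLoop (s enc : List Char) (c : Int) (hc : 0 ≤ c) :
    ∀ (fuel start : Nat) (b : Bool) (prev : Int), s.length + 1 - start ≤ fuel →
      pvLoopA s enc c b prev start = pvListLoop c (pvOccFrom s enc start) b prev := by
  intro fuel
  induction fuel with
  | zero =>
    intro start b prev hle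
    have hbig : s.length < start := by omega
    rw [pvLoopA, pvOccFrom_empty s enc start hbig, pvFind_eq_headD,
        pvOccFrom_empty s enc start hbig]
    have hnc : ¬ (c < ((-1 : Int))) := by omega
    simp [pvListLoop, hnc]
  | succ fuel ih =>
    intro start b prev hle
    rw [pvLoopA, pvFind_eq_headD]
    rcases hocc : pvOccFrom s enc start with _ | ⟨h, t⟩
    · have hnc : ¬ (c < ((-1 : Int))) := by omega
      simp [pvListLoop, hnc]
    · have hhmem : h ∈ pvOccFrom s enc start := by rw [hocc]; simp
      have hhf := List.mem_filter.mp hhmem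
      have hhall := pvMem_occAll.mp hhf.1
      have hhstart : (start : Int) ≤ h := by simpa using hhf.2
      simp only [List.headD_cons]
      by_cases hch : c < h
      · simp [pvListLoop, hch]
      · have hne : h ≠ -1 := by omega
        simp only [hch, if_false, hne, ne_eq, not_false_eq_true, dif_pos]
        rw [ih (h.toNat + 1) (!b) h (by omega), pvOccFrom_tail s enc start h t hocc]
        simp [pvListLoop, hch]

theorem pvGetLastD_take (l : List Int) (k : Nat) (d : Int) (h1 : 1 ≤ k) (h2 : k ≤ l.length) :
    (l.take k).getLastD d = l.getD (k - 1) d := by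
  rw [List.getLastD_eq_getLast?, List.getLast?_eq_getElem?, List.getElem?_take]
  · have hlen : (l.take k).length = k := by simp; omega
    rw [hlen]
    simp only [show k - 1 < k by omega, if_true]
    rw [List.getD_eq_getElem?_getD]
  
theorem pvListLoop_spec (c : Int) :
    ∀ (l : List Int), l.Pairwise (· < ·) → ∀ (b : Bool) (prev : Int),
      pvListLoop c l b prev =
        (let k := (l.filter (fun p => p ≤ c)).length;
         if xor b (decide (k % 2 = 1)) = true then
           some ((l.take k).getLastD prev, if k < l.length then l.getD k (-1) else -1)
         else none) := by
  intro l
  induction l with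
  | nil => intro _ b prev; cases b <;> simp [pvListLoop]
  | cons h t ih =>
    intro hsorted b prev
    have hgt := (List.pairwise_cons.mp hsorted).1
    by_cases hch : c < h
    · have hfilt : (h :: t).filter (fun p => decide (p ≤ c)) = [] := by
        rw [List.filter_eq_nil_iff]
        intro a ha
        rcases List.mem_cons.mp ha with rfl | hmem
        · simp; omega
        · have := hgt a hmem; simp; omega
      rw [pvListLoop]
      simp only [hfilt, List.length_nil, hch, if_true]
      cases b <;> simp
    · have hfilt : (h :: t).filter (fun p => decide (p ≤ c))
          = h :: t.filter (fun p => decide (p ≤ c)) := by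
        simp [show h ≤ c by omega]
      rw [pvListLoop]
      simp only [hch, if_false]
      rw [ih (List.pairwise_cons.mp hsorted).2 (!b) h]
      set kt := (t.filter (fun p => decide (p ≤ c))).length with hkt
      have hktle : kt ≤ t.length := by rw [hkt]; exact List.length_filter_le _ _
      have hpar : xor (!b) (decide (kt % 2 = 1)) = xor b (decide ((kt + 1) % 2 = 1)) := by
        rcases Nat.mod_two_eq_zero_or_one kt with hp | hp <;>
          cases b <;> simp [hp, Nat.add_mod]
      simp only [hfilt, List.length_cons, ← hkt, hpar]
      have hsnd : (if kt + 1 < t.length + 1 then (h :: t).getD (kt + 1) (-1) else -1)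
          = (if kt < t.length then t.getD kt (-1) else -1) := by
        by_cases hlt : kt < t.length
        · simp [hlt, show kt + 1 < t.length + 1 from by omega]
        · simp [hlt, show ¬ (kt + 1 < t.length + 1) from by omega]
      rw [List.take_succ_cons, List.getLastD_cons, hsnd]

theorem pvOccFrom_zero (s enc : List Char) : pvOccFrom s enc 0 = pvOccAll s enc := by
  apply List.filter_eq_self.mpr
  intro x hx
  have := (pvMem_occAll.mp hx).1
  simp; omega

theorem IndicesOfEnclosingChars_spec : Claim_equal_IndicesOfEnclosingChars := by
  intro string encloser charIndex _
  unfold Spec_IndicesOfEnclosingChars IndicesOfEnclosingChars IndicesOfEnclosingChars_alt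
  split_ifs with hg
  · rfl
  · have hc : 0 ≤ charIndex := by
      rw [not_or] at hg
      have h0 : 0 ≤ PySem.Str.len encloser := by simp [PySem.Str.len_eq]
      omega
    have hocc : (PySem.List.pyRange 0 (PySem.Str.len string + 1) 1).filter
        (fun i => PySem.Chars.startswith (string.toList.drop i.toNat) encloser.toList)
        = pvOccAll string.toList encloser.toList := by
      unfold pvOccAll
      simp [PySem.Str.len_eq]
    rw [pvLoopA_eq_listLoop string.toList encloser.toList charIndex hc
          (string.toList.length + 1) 0 false (-1) (by omega),
        pvOccFrom_zero,
        pvListLoop_spec charIndex _ (pvOccAll_sorted string.toList encloser.toList)]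
    simp only [hocc]
    set l := pvOccAll string.toList encloser.toList with hl
    set k := (l.filter (fun p => decide (p ≤ charIndex))).length with hk
    have hkle : k ≤ l.length := by rw [hk]; exact List.length_filter_le _ _
    by_cases hodd : k % 2 = 1
    · simp only [hodd, decide_true, Bool.false_xor, if_true]
      congr 2
      exact pvGetLastD_take l k (-1) (by omega) hkle
    · simp [hodd]
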